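-- pv_equiv track=rewrite | github.com/gregor-nelson/MotData | scripts/model_report_generator/generate_model_report.py | aggregate_rankings
-- ===== SOURCE A (Python) =====
-- def aggregate_rankings(all_rankings: list[dict]) -> dict:
--     """Aggregate rankings across variants - show best ranking achieved."""
--     if not all_rankings:
--         return {}
--
--     result = {}
--     for rankings in all_rankings:
--         if not rankings:
--             continue
--         for rank_type, rank_data in rankings.items():
--             if not rank_data:
--                 continue
--             if rank_type not in result or rank_data.get("rank", 999999) < result[rank_type].get("rank", 999999):
--                 result[rank_type] = rank_data
--     return result
-- ===== SOURCE B (Python) =====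
-- def aggregate_rankings(all_rankings: list[dict]) -> dict:
--     """Aggregate rankings across variants - show best ranking achieved."""
--     flat = [(t, d) for rankings in all_rankings
--             for t, d in rankings.items() if d]
--     order = dict.fromkeys(t for t, _ in flat)
--     return {t: min((d for t2, d in flat if t2 == t),
--                    key=lambda d: d.get("rank", 999999))
--             for t in order}
-- ===== Notes on version B (the rewrite author's own statement) =====
-- stated objective: alternative
-- what changed: A keeps a best-so-far dict and compare-overwrites item by item; B flattens all non-empty (rank_type, rank_data) pairs into one list, dedups the types first-seen, and for each type takes min by rank over a per-type scan of the flat list.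
import Mathlib
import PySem

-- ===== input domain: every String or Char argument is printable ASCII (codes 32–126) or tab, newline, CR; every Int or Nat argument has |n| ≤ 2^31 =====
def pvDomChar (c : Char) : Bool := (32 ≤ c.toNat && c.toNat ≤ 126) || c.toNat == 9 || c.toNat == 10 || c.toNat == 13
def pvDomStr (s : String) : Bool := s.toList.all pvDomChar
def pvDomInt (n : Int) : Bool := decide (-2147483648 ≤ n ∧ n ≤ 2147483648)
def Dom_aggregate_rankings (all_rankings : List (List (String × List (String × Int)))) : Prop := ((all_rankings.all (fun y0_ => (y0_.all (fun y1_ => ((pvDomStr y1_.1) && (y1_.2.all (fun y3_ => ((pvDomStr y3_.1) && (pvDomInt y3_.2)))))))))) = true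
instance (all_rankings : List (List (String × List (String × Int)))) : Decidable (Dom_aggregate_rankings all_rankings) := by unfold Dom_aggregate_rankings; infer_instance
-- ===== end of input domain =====

-- B replaces A's incremental compare-and-overwrite dict by a flatten / dedup-keys /
-- per-type min scan decomposition ('alternative'; same results, not claimed faster).

-- ===== PORT A =====
-- rank_data.get("rank", 999999)
def pvRank (rd : List (String × Int)) : Int := (PySem.Dict.mk rd).getD "rank" 999999

-- body of A's inner loop over rankings.items()
def pvStepA (result : PySem.Dict String (List (String × Int)))
    (p : String × List (String × Int)) : PySem.Dict String (List (String × Int)) :=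
  if p.2 = [] then result
  else if result.contains p.1 = false ∨ pvRank p.2 < pvRank (result.getD p.1 []) then
    result.insert p.1 p.2
  else result

-- body of A's outer loop ('if not rankings: continue')
def pvRowA (result : PySem.Dict String (List (String × Int)))
    (rankings : List (String × List (String × Int))) : PySem.Dict String (List (String × Int)) :=
  if rankings = [] then result else rankings.foldl pvStepA result

def aggregate_rankings (all_rankings : List (List (String × List (String × Int)))) :
    List (String × List (String × Int)) :=
  if all_rankings = [] then []
  else (all_rankings.foldl pvRowA PySem.Dict.empty).items

-- ===== PORT B =====
-- flat = [(t, d) for rankings in all_rankings for t, d in rankings.items() if d]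
def pvFlat (all_rankings : List (List (String × List (String × Int)))) :
    List (String × List (String × Int)) :=
  all_rankings.flatMap (fun rankings => rankings.filter (fun p => !p.2.isEmpty))

-- the generator (d for t2, d in flat if t2 == t)
def pvCands (flat : List (String × List (String × Int))) (t : String) :
    List (List (String × Int)) :=
  (flat.filter (fun p => p.1 == t)).map Prod.snd

-- min(…, key=lambda d: d.get("rank", 999999)); each group is nonempty by construction
def pvBest (flat : List (String × List (String × Int))) (t : String) : List (String × Int) :=
  (PySem.List.min? (pvCands flat t) pvRank).getD []

def aggregate_rankings_alt (all_rankings : List (List (String × List (String × Int)))) :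
    List (String × List (String × Int)) :=
  let flat := pvFlat all_rankings
  (PySem.List.dedup (flat.map Prod.fst)).map (fun t => (t, pvBest flat t))

-- ===== PRECONDITION & SPEC =====
def Spec_aggregate_rankings (all_rankings : List (List (String × List (String × Int)))) (out : List (String × List (String × Int))) : Prop := out = aggregate_rankings_alt all_rankings
instance (all_rankings : List (List (String × List (String × Int)))) (out : List (String × List (String × Int))) : Decidable (Spec_aggregate_rankings all_rankings out) := by unfold Spec_aggregate_rankings; infer_instance

-- ===== CLAIM (what is proved, stated in full; the proofs are below) =====
def Claim_equal_aggregate_rankings : Prop := ∀ (all_rankings : List (List (String × List (String × Int)))), Dom_aggregate_rankings all_rankings → Spec_aggregate_rankings all_rankings (aggregate_rankings all_rankings)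

-- ===== LEMMAS AND PROOFS =====

-- A's fold over rows = a fold of pvStepA over the flattened, filtered items
theorem pvfoldl_filter (r : List (String × List (String × Int)))
    (d : PySem.Dict String (List (String × Int))) :
    (r.filter (fun p => !p.2.isEmpty)).foldl pvStepA d = r.foldl pvStepA d := by
  induction r generalizing d with
  | nil => rfl
  | cons x t ih =>
    by_cases hx : x.2 = []
    · simp [hx, ih, pvStepA]
    · simp [hx, ih]

theorem pvrowA_eq (r : List (String × List (String × Int)))
    (d : PySem.Dict String (List (String × Int))) :
    pvRowA d r = (r.filter (fun p => !p.2.isEmpty)).foldl pvStepA d := by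
  rw [pvfoldl_filter]
  by_cases hr : r = [] <;> simp [pvRowA, hr]

theorem pvfold_flat (all_rankings : List (List (String × List (String × Int)))) :
    ∀ d, all_rankings.foldl pvRowA d = (pvFlat all_rankings).foldl pvStepA d := by
  induction all_rankings with
  | nil => intro d; rfl
  | cons r t ih =>
    intro d
    simp only [List.foldl_cons, pvFlat, List.flatMap_cons, List.foldl_append, pvrowA_eq]
    exact ih _

-- invariant: after folding pvStepA over l (all items non-empty), the dict's keys are
-- l's first-seen types and each key holds the first min-by-rank candidate
def pvInv (l : List (String × List (String × Int)))
    (dA : PySem.Dict String (List (String × Int))) : Prop :=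
  dA.keys = PySem.List.dedup (l.map Prod.fst) ∧
    ∀ k, dA.get? k = PySem.List.min? (pvCands l k) pvRank

theorem pvmin_append_some (xs : List (List (String × Int))) (y m : List (String × Int))
    (h : PySem.List.min? xs pvRank = some m) :
    PySem.List.min? (xs ++ [y]) pvRank = some (if pvRank y < pvRank m then y else m) := by
  simp only [PySem.List.min?] at h ⊢
  rw [List.foldl_append, h]
  simp only [List.foldl_cons, List.foldl_nil]
  split_ifs <;> rfl

theorem pvcands_append (l : List (String × List (String × Int)))
    (p : String × List (String × Int)) (k : String) :
    pvCands (l ++ [p]) k = pvCands l k ++ if p.1 == k then [p.2] else [] := by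
  simp only [pvCands, List.filter_append, List.map_append]
  by_cases h : p.1 == k <;> simp [h]

theorem pvcands_nil_of_not_mem (l : List (String × List (String × Int))) (k : String)
    (h : k ∉ l.map Prod.fst) : pvCands l k = [] := by
  simp only [pvCands, List.map_eq_nil_iff, List.filter_eq_nil_iff]
  intro p hp
  simp only [beq_iff_eq]
  intro he
  exact h (List.mem_map.mpr ⟨p, hp, he⟩)

theorem pvcands_ne_nil_of_mem (l : List (String × List (String × Int))) (k : String)
    (h : k ∈ l.map Prod.fst) : pvCands l k ≠ [] := by
  obtain ⟨p, hp, he⟩ := List.mem_map.mp h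
  refine List.ne_nil_of_mem (a := p.2) ?_
  simp only [pvCands, List.mem_map]
  exact ⟨p, List.mem_filter.mpr ⟨hp, by simp [he]⟩, rfl⟩

theorem pvInv_step (l : List (String × List (String × Int)))
    (dA : PySem.Dict String (List (String × Int)))
    (p : String × List (String × Int)) (hp : p.2 ≠ []) (h : pvInv l dA) :
    pvInv (l ++ [p]) (pvStepA dA p) := by
  obtain ⟨hk, hget⟩ := h
  have hdedup : PySem.List.dedup ((l ++ [p]).map Prod.fst)
      = PySem.Set.add (PySem.List.dedup (l.map Prod.fst)) p.1 := by
    simp [PySem.Set.ofList_append_singleton]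
  by_cases hmem : p.1 ∈ l.map Prod.fst
  · -- seen key: cands nonempty, A compares with the stored min
    obtain ⟨m, hm⟩ := Option.ne_none_iff_exists'.mp
      (by rw [Ne, PySem.List.min?_eq_none_iff]; exact pvcands_ne_nil_of_mem l p.1 hmem :
        PySem.List.min? (pvCands l p.1) pvRank ≠ none)
    have hgp : dA.get? p.1 = some m := by rw [hget, hm]
    have hc : dA.contains p.1 = true := by
      rw [PySem.Dict.contains_eq_isSome_get?, hgp]; rfl
    have hdD : dA.getD p.1 [] = m := PySem.Dict.getD_of_get?_eq_some _ _ hgp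
    have hmemD : p.1 ∈ PySem.List.dedup (l.map Prod.fst) := (by simp [PySem.List.dedup, PySem.Set.mem_ofList, hmem])
    have hkeys' : PySem.List.dedup ((l ++ [p]).map Prod.fst)
        = PySem.List.dedup (l.map Prod.fst) := by
      rw [hdedup, PySem.Set.add_of_mem hmemD]
    by_cases hlt : pvRank p.2 < pvRank m
    · have hstep : pvStepA dA p = dA.insert p.1 p.2 := by
        simp [pvStepA, hp, hdD, hlt]
      refine ⟨?_, ?_⟩
      · rw [hstep, PySem.Dict.keys_insert_of_contains dA _ hc, hk, hkeys']
      · intro k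
        rw [hstep, PySem.Dict.get?_insert, pvcands_append]
        by_cases hkp : k = p.1
        · subst hkp
          rw [if_pos rfl, if_pos (by simp), pvmin_append_some _ _ _ hm, if_pos hlt]
        · rw [if_neg hkp, if_neg (by simp [Ne.symm hkp]), List.append_nil, hget]
    · have hstep : pvStepA dA p = dA := by
        simp [pvStepA, hp, hdD, hlt, hc]
      refine ⟨by rw [hstep, hk, hkeys'], ?_⟩
      intro k
      rw [hstep, pvcands_append]
      by_cases hkp : k = p.1
      · subst hkp
        rw [if_pos (by simp), pvmin_append_some _ _ _ hm, if_neg hlt, hget, hm]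
      · rw [if_neg (by simp [Ne.symm hkp]), List.append_nil, hget]
  · -- fresh key: A inserts, the dedup gains p.1 at the end
    have hgp : dA.get? p.1 = none := by
      rw [hget, PySem.List.min?_eq_none_iff]
      exact pvcands_nil_of_not_mem l p.1 hmem
    have hc : dA.contains p.1 = false := by
      rw [PySem.Dict.contains_eq_isSome_get?, hgp]; rfl
    have hstep : pvStepA dA p = dA.insert p.1 p.2 := by
      simp [pvStepA, hp, hc]
    have hmemD : p.1 ∉ PySem.List.dedup (l.map Prod.fst) := fun h =>
      hmem (by simpa [PySem.List.dedup, PySem.Set.mem_ofList] using h)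
    refine ⟨?_, ?_⟩
    · rw [hstep, PySem.Dict.keys_insert_of_not_contains dA _ hc, hk, hdedup,
        PySem.Set.add_of_not_mem hmemD]
    · intro k
      rw [hstep, PySem.Dict.get?_insert, pvcands_append]
      by_cases hkp : k = p.1
      · subst hkp
        rw [if_pos rfl, if_pos (by simp), pvcands_nil_of_not_mem l _ hmem]
        simp [PySem.List.min?]
      · rw [if_neg hkp, if_neg (by simp [Ne.symm hkp]), List.append_nil, hget]

theorem pvInv_foldl (l : List (String × List (String × Int)))
    (hne : ∀ p ∈ l, p.2 ≠ []) :
    pvInv l (l.foldl pvStepA PySem.Dict.empty) := by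
  induction l using List.reverseRecOn with
  | nil =>
    refine ⟨by simp [PySem.Dict.keys_empty, PySem.List.dedup], ?_⟩
    intro k
    simp [PySem.Dict.get?_empty, pvCands, PySem.List.min?]
  | append_singleton l p ih =>
    rw [List.foldl_append, List.foldl_cons, List.foldl_nil]
    exact pvInv_step l _ p (hne p (by simp)) (ih fun q hq => hne q (by simp [hq]))

theorem pvflat_all_ne_nil (all_rankings : List (List (String × List (String × Int)))) :
    ∀ p ∈ pvFlat all_rankings, p.2 ≠ [] := by
  intro p hp
  simp only [pvFlat, List.mem_flatMap, List.mem_filter] at hp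
  obtain ⟨r, -, -, h2⟩ := hp
  simpa using h2

theorem pvInv_items (l : List (String × List (String × Int)))
    (dA : PySem.Dict String (List (String × Int))) (h : pvInv l dA) :
    dA.items = (PySem.List.dedup (l.map Prod.fst)).map (fun t => (t, pvBest l t)) := by
  obtain ⟨hk, hget⟩ := h
  have hnd : dA.keys.Nodup := by rw [hk]; exact PySem.List.nodup_dedup _
  rw [PySem.Dict.items_eq_map_keys dA hnd [], hk]
  refine List.map_congr_left ?_
  intro k hkmem
  have hkm : k ∈ l.map Prod.fst := (by simpa [PySem.List.dedup, PySem.Set.mem_ofList] using hkmem)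
  obtain ⟨m, hm⟩ := Option.ne_none_iff_exists'.mp
    (by rw [Ne, PySem.List.min?_eq_none_iff]; exact pvcands_ne_nil_of_mem l k hkm :
      PySem.List.min? (pvCands l k) pvRank ≠ none)
  have : dA.getD k [] = m :=
    PySem.Dict.getD_of_get?_eq_some _ _ (by rw [hget, hm])
  simp [this, pvBest, hm]

-- ===== VERDICT (by name: the statement is the Claim_ definition above) =====
theorem aggregate_rankings_spec : Claim_equal_aggregate_rankings := by
  intro all_rankings _
  unfold Spec_aggregate_rankings
  by_cases har : all_rankings = []
  · simp [aggregate_rankings, aggregate_rankings_alt, har, pvFlat, PySem.List.dedup,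
      PySem.Set.ofList]
  · rw [aggregate_rankings, if_neg har, pvfold_flat, aggregate_rankings_alt]
    exact pvInv_items _ _ (pvInv_foldl _ (pvflat_all_ne_nil all_rankings))
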